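-- pv_equiv track=rewrite | github.com/colinpade/hylo-stability-pool-monitor | scan_rebalance_patterns.py | find_hits
-- ===== SOURCE A (Python) =====
-- def find_hits(logs, patterns):
--     hits = []
--     lowered = [line.lower() for line in logs]
--     for pattern in patterns:
--         p = pattern.lower()
--         for original, lower in zip(logs, lowered):
--             if p in lower:
--                 hits.append(original)
--     # stable unique order
--     seen = set()
--     unique = []
--     for line in hits:
--         if line not in seen:
--             seen.add(line)
--             unique.append(line)
--     return unique
-- ===== SOURCE B (Python) =====
-- def find_hits(logs, patterns):
--     lowpats = [p.lower() for p in patterns]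
--     buckets = [[] for _ in lowpats]
--     seen = set()
--     for line in logs:
--         if line not in seen:
--             seen.add(line)
--             low = line.lower()
--             for j, p in enumerate(lowpats):
--                 if p in low:
--                     buckets[j].append(line)
--                     break
--     return [line for bucket in buckets for line in bucket]
-- ===== Notes on version B (the rewrite author's own statement) =====
-- stated objective: faster
-- what changed: B makes one pass over the logs, deduplicating up front and lowercasing each distinct line once, assigns each distinct line to the bucket of its first matching pattern with an early break, and concatenates the buckets in pattern order, instead of A's pattern-major rescan of all logs per pattern followed by a separate dedup pass over the collected hits.
import Mathlib
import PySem

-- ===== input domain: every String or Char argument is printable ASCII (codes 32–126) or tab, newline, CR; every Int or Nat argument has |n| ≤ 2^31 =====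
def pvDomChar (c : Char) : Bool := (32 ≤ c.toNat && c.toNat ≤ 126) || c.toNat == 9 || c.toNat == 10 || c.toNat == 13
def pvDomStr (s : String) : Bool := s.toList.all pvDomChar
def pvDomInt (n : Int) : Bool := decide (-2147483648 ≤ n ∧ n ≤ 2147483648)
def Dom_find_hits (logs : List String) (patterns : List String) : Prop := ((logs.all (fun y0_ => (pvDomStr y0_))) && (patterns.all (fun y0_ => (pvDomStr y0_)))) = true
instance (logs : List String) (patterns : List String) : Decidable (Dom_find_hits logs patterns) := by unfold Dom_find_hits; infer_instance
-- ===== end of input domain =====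

-- B changes the traversal: one pass over the logs (dedup first, lowercase each distinct
-- line once, first-matching-pattern bucket with an early break), then concatenate the
-- buckets, instead of A's pattern-major rescan of all logs plus a separate dedup pass.
-- Same return value; neither mutates its arguments.

-- ===== PORT A =====
def find_hits (logs : List String) (patterns : List String) : List String :=
  let lowered := logs.map (fun line => PySem.Str.lower line)
  let hits := patterns.foldl (fun hits pattern =>
    let p := PySem.Str.lower pattern
    (logs.zip lowered).foldl (fun hits ol =>
      if PySem.Str.isIn p ol.2 then hits ++ [ol.1] else hits) hits) []
  let su := hits.foldl (fun (su : PySem.Set String × List String) line =>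
      if PySem.Set.contains su.1 line then su
      else (PySem.Set.add su.1 line, su.2 ++ [line]))
      (PySem.Set.empty, [])
  su.2

-- ===== PORT B =====
-- inner 'for j, p in enumerate(lowpats): if p in low: buckets[j].append(line); break'
def pvPlaceLine (lowpats : List String) (j : Nat) (low : String) (line : String)
    (buckets : List (List String)) : List (List String) :=
  match lowpats with
  | [] => buckets
  | p :: rest =>
      if PySem.Str.isIn p low then buckets.modify j (fun b => b ++ [line])
      else pvPlaceLine rest (j + 1) low line buckets

def find_hits_alt (logs : List String) (patterns : List String) : List String :=
  let lowpats := patterns.map (fun p => PySem.Str.lower p)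
  let sb := logs.foldl (fun (sb : PySem.Set String × List (List String)) line =>
      if PySem.Set.contains sb.1 line then sb
      else (PySem.Set.add sb.1 line,
            pvPlaceLine lowpats 0 (PySem.Str.lower line) line sb.2))
      (PySem.Set.empty, lowpats.map (fun _ => []))
  sb.2.flatMap (fun bucket => bucket)

-- ===== PRECONDITION & SPEC =====
def Spec_find_hits (logs : List String) (patterns : List String) (out : List String) : Prop := out = find_hits_alt logs patterns
instance (logs : List String) (patterns : List String) (out : List String) : Decidable (Spec_find_hits logs patterns out) := by unfold Spec_find_hits; infer_instance

-- ===== CLAIM (what is proved, stated in full; the proofs are below) =====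
def Claim_equal_find_hits : Prop := ∀ (logs : List String) (patterns : List String), Dom_find_hits logs patterns → Spec_find_hits logs patterns (find_hits logs patterns)

-- ===== LEMMAS AND PROOFS =====

-- match test shared by both programs (patterns pre-lowered)
def pvM (p v : String) : Bool := PySem.Str.isIn p (PySem.Str.lower v)

-- ordered dedup relative to an already-seen predicate
def pvDedup (s : String → Bool) : List String → List String
  | [] => []
  | x :: xs => if s x then pvDedup s xs else x :: pvDedup (fun y => s y || y == x) xs

theorem pvDedup_append (a b : List String) : ∀ (s : String → Bool),
    pvDedup s (a ++ b) = pvDedup s a ++ pvDedup (fun v => s v || a.contains v) b := by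
  induction a with
  | nil =>
      intro s; simp [pvDedup]
  | cons x a ih =>
      intro s
      simp only [List.cons_append, pvDedup]
      by_cases hx : s x = true
      · rw [if_pos hx, if_pos hx, ih]
        congr 1
        congr 1
        funext v
        by_cases hvx : v = x
        · subst hvx; simp [hx]
        · simp [hvx]
      · rw [if_neg hx, if_neg hx, ih]
        simp only [List.cons_append, List.cons.injEq, true_and]
        congr 1
        have hf : (fun v => (s v || v == x) || a.contains v)
            = (fun v => s v || (x :: a).contains v) := by
          funext v
          simp only [List.contains_cons]
          cases s v <;> cases a.contains v <;> by_cases hvx : v = x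
          all_goals first
            | (subst hvx; simp)
            | simp
        rw [hf]

-- dedup commutes with a value filter, as long as the two seen predicates agree on kept values
theorem pvDedup_filter (q : String → Bool) (xs : List String) : ∀ (s s' : String → Bool),
    (∀ v, q v = true → s' v = s v) →
    pvDedup s' (xs.filter q) = (pvDedup s xs).filter q := by
  induction xs with
  | nil => intro s s' _; simp [pvDedup]
  | cons x xs ih =>
      intro s s' hss
      by_cases hq : q x = true
      · rw [List.filter_cons_of_pos hq]
        simp only [pvDedup]
        rw [hss x hq]
        by_cases hx : s x = true
        · rw [if_pos hx, if_pos hx]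
          exact ih s s' hss
        · rw [if_neg hx, if_neg hx, List.filter_cons_of_pos hq]
          congr 1
          exact ih _ _ (by intro v hv; simp [hss v hv])
      · have hq' : q x = false := by simpa using hq
        rw [List.filter_cons_of_neg (by simp [hq'])]
        simp only [pvDedup]
        by_cases hx : s x = true
        · rw [if_pos hx]; exact ih s s' hss
        · rw [if_neg hx, List.filter_cons_of_neg (by simp [hq'])]
          exact ih _ s' (by
            intro v hv
            have hvx : (v == x) = false := by
              by_cases h : v = x
              · subst h; exact absurd hv (by simp [hq'])
              · simp [h]
            simp [hvx, hss v hv])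

-- elements already covered by the seen predicate can be filtered out beforehand
theorem pvDedup_dropSeen (q : String → Bool) (xs : List String) : ∀ (s : String → Bool),
    (∀ v ∈ xs, q v = false → s v = true) →
    pvDedup s xs = pvDedup s (xs.filter q) := by
  induction xs with
  | nil => intro s _; simp
  | cons x xs ih =>
      intro s h
      by_cases hq : q x = true
      · simp only [List.filter_cons, hq, if_pos, pvDedup]
        by_cases hx : s x = true
        · rw [if_pos hx, if_pos hx]; exact ih s (fun v hv => h v (List.mem_cons_of_mem _ hv))
        · rw [if_neg hx, if_neg hx]
          congr 1
          exact ih _ (by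
            intro v hv hqv
            simp [h v (List.mem_cons_of_mem _ hv) hqv])
      · have hq' : q x = false := by simpa using hq
        have hx : s x = true := h x (List.mem_cons_self) hq'
        simp only [List.filter_cons, hq', Bool.false_eq_true, if_false, pvDedup, if_pos hx]
        exact ih s (fun v hv => h v (List.mem_cons_of_mem _ hv))

-- main characterisation: pattern-major collect-then-dedup = first-pattern buckets over deduped logs
set_option maxHeartbeats 1000000 in
theorem pvMain (ps : List String) : ∀ (s : String → Bool) (logs : List String),
    pvDedup s (ps.flatMap (fun p => logs.filter (fun v => pvM p v))) =
    (List.range ps.length).flatMap (fun j =>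
      (pvDedup s logs).filter (fun v => ps.findIdx? (fun p => pvM p v) = some j)) := by
  induction ps with
  | nil => intro s logs; simp [pvDedup]
  | cons p rest ih =>
      intro s logs
      rw [List.flatMap_cons, pvDedup_append]
      -- first block = filter (pvM p) of the deduped logs
      rw [pvDedup_filter (fun v => pvM p v) logs s s (fun _ _ => rfl)]
      -- second block: drop the already-seen (pvM p) lines, then use the IH on the remaining logs
      rw [pvDedup_dropSeen (fun v => !(pvM p v))
            (rest.flatMap (fun q => logs.filter (fun v => pvM q v))) _
            (by
              intro v hv hq
              have hm : pvM p v = true := by simpa using hq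
              have hvlogs : v ∈ logs := by
                rcases List.mem_flatMap.1 hv with ⟨q, _, hvq⟩
                exact (List.mem_filter.1 hvq).1
              have hc : (logs.filter (fun v => pvM p v)).contains v = true :=
                List.contains_iff_mem.2 (List.mem_filter.2 ⟨hvlogs, hm⟩)
              simp only [hc, Bool.or_true])]
      rw [List.filter_flatMap]
      have hff : (fun q => (logs.filter (fun v => pvM q v)).filter (fun v => !(pvM p v)))
          = (fun q => (logs.filter (fun v => !(pvM p v))).filter (fun v => pvM q v)) := by
        funext q; exact List.filter_comm _ _ _
      rw [hff, ih]
      -- the seen predicate of the tail agrees with s on the ¬(pvM p) lines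
      rw [pvDedup_filter (fun v => !(pvM p v)) logs s
            (fun v => s v || (logs.filter (fun v => pvM p v)).contains v)
            (by
              intro v hv
              simp only [Bool.not_eq_true'] at hv
              have hcf : (logs.filter (fun v => pvM p v)).contains v = false := by
                cases hc : (logs.filter (fun v => pvM p v)).contains v
                · rfl
                · have := (List.mem_filter.1 (List.contains_iff_mem.1 hc)).2
                  rw [hv] at this; simp at this
              simp only [hcf, Bool.or_false])]
      -- assemble the (p :: rest) buckets
      rw [List.length_cons, List.range_succ_eq_map, List.flatMap_cons, List.flatMap_map]
      congr 1
      · apply List.filter_congr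
        intro v _
        rw [List.findIdx?_cons]
        cases h : pvM p v
        · simp only [Bool.false_eq_true, if_false]
          cases hfi : rest.findIdx? (fun p => pvM p v) <;> simp
        · simp
      · congr 1
        funext j
        rw [List.filter_filter]
        apply List.filter_congr
        intro v _
        rw [List.findIdx?_cons]
        cases h : pvM p v
        · simp only [Bool.false_eq_true, if_false]
          cases hfi : rest.findIdx? (fun p => pvM p v) <;> simp
        · simp

-- A's port computes the dedup of the pattern-major hits list
theorem pvA_fold (hits : List String) : ∀ (t : PySem.Set String) (u : List String),
    (hits.foldl (fun (su : PySem.Set String × List String) line =>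
      if PySem.Set.contains su.1 line then su
      else (PySem.Set.add su.1 line, su.2 ++ [line])) (t, u)).2
    = u ++ pvDedup (fun v => PySem.Set.contains t v) hits := by
  induction hits with
  | nil => intro t u; simp [pvDedup]
  | cons x hits ih =>
      intro t u
      simp only [List.foldl_cons, pvDedup]
      by_cases hx : PySem.Set.contains t x = true
      · rw [if_pos hx, if_pos hx]; exact ih t u
      · rw [if_neg hx, if_neg hx, ih]
        have hx' : PySem.Set.contains t x = false := by
          cases h : PySem.Set.contains t x
          · rfl
          · exact absurd h hx
        have hadd : (fun v => PySem.Set.contains (PySem.Set.add t x) v)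
            = (fun v => PySem.Set.contains t v || v == x) := by
          funext v
          simp only [PySem.Set.add, PySem.Set.contains_eq_listContains] at hx' ⊢
          rw [if_neg (by rw [hx']; exact Bool.false_ne_true)]
          by_cases hvx : v = x
          · subst hvx; simp
          · simp [hvx]
        rw [hadd]
        simp

theorem pvA_eq (logs patterns : List String) :
    find_hits logs patterns =
      pvDedup (fun _ => false)
        ((patterns.map (fun p => PySem.Str.lower p)).flatMap
          (fun p => logs.filter (fun v => pvM p v))) := by
  unfold find_hits
  rw [pvA_fold]
  rw [PySem.List.foldl_congr_mem patterns _
        (fun hits pattern => hits ++ logs.filter (fun v => pvM (PySem.Str.lower pattern) v)) []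
        (by
          intro acc pat _
          show (List.foldl (fun hits ol => if PySem.Str.isIn (PySem.Str.lower pat) ol.2 = true then hits ++ [ol.1] else hits) acc
              (logs.zip (logs.map (fun line => PySem.Str.lower line)))) = _
          rw [← List.map_prod_left_eq_zip]
          rw [PySem.List.foldl_append_if (fun ol : String × String => PySem.Str.isIn (PySem.Str.lower pat) ol.2) (fun ol : String × String => ol.1) (logs.map (fun x => (x, PySem.Str.lower x))) acc]
          rw [List.filter_map, List.map_map]
          simp [pvM, Function.comp_def])]
  rw [PySem.List.foldl_append_eq_flatMap, List.flatMap_map]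
  simp

-- B's inner loop: put the line in the bucket of its first matching pattern
theorem pvPlaceLine_spec (lp : List String) : ∀ (k : Nat) (low line : String) (bs : List (List String)),
    pvPlaceLine lp k low line bs =
      match lp.findIdx? (fun p => PySem.Str.isIn p low) with
      | some i => bs.modify (k + i) (fun b => b ++ [line])
      | none => bs := by
  induction lp with
  | nil => intro k low line bs; simp [pvPlaceLine]
  | cons p rest ih =>
      intro k low line bs
      rw [List.findIdx?_cons]
      simp only [pvPlaceLine]
      by_cases hp : PySem.Str.isIn p low = true
      · rw [if_pos hp, if_pos hp]
        simp
      · rw [if_neg hp, if_neg hp, ih]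
        cases hfi : rest.findIdx? (fun p => PySem.Str.isIn p low) with
        | none => simp
        | some i => simp [Nat.add_comm 1 i, Nat.add_assoc]

theorem pvPlaceLine_length (lp : List String) (k : Nat) (low line : String) (bs : List (List String)) :
    (pvPlaceLine lp k low line bs).length = bs.length := by
  rw [pvPlaceLine_spec]
  cases rest : lp.findIdx? (fun p => PySem.Str.isIn p low) <;> simp

-- B's port: bucket invariant
theorem pvB_fold (L : List String) (logs : List String) : ∀ (t : PySem.Set String) (bs : List (List String)),
    bs.length = L.length →
    (logs.foldl (fun (sb : PySem.Set String × List (List String)) line =>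
      if PySem.Set.contains sb.1 line then sb
      else (PySem.Set.add sb.1 line,
            pvPlaceLine L 0 (PySem.Str.lower line) line sb.2)) (t, bs)).2
    = bs.mapIdx (fun j b => b ++ (pvDedup (fun v => PySem.Set.contains t v) logs).filter
        (fun v => L.findIdx? (fun p => pvM p v) = some j)) := by
  induction logs with
  | nil =>
      intro t bs _
      simp only [List.foldl_nil, pvDedup]
      apply List.ext_getElem (by simp)
      intro j h1 h2
      simp [List.getElem_mapIdx]
  | cons x logs ih =>
      intro t bs hlen
      simp only [List.foldl_cons, pvDedup]
      by_cases hx : PySem.Set.contains t x = true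
      · rw [if_pos hx, if_pos hx]; exact ih t bs hlen
      · rw [if_neg hx, if_neg hx]
        rw [ih _ _ (by rw [pvPlaceLine_length]; exact hlen)]
        have hx' : PySem.Set.contains t x = false := by
          cases h : PySem.Set.contains t x
          · rfl
          · exact absurd h hx
        have hadd : (fun v => PySem.Set.contains (PySem.Set.add t x) v)
            = (fun v => PySem.Set.contains t v || v == x) := by
          funext v
          simp only [PySem.Set.add, PySem.Set.contains_eq_listContains] at hx' ⊢
          rw [if_neg (by rw [hx']; exact Bool.false_ne_true)]
          by_cases hvx : v = x
          · subst hvx; simp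
          · simp [hvx]
        rw [hadd]
        apply List.ext_getElem (by simp [pvPlaceLine_length])
        intro j h1 h2
        have hps : L.findIdx? (fun p => PySem.Str.isIn p (PySem.Str.lower x))
            = L.findIdx? (fun p => pvM p x) := rfl
        cases hfi : L.findIdx? (fun p => pvM p x) with
        | none =>
            simp only [List.getElem_mapIdx, pvPlaceLine_spec, hps, hfi]
            rw [List.filter_cons_of_neg (by simp [hfi])]
        | some i =>
            simp only [List.getElem_mapIdx, pvPlaceLine_spec, hps, hfi]
            simp only [List.getElem_modify, Nat.zero_add]
            by_cases hij : i = j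
            · subst hij
              rw [if_pos rfl, List.filter_cons_of_pos (by simp [hfi])]
              simp [List.append_assoc]
            · rw [if_neg hij, List.filter_cons_of_neg (by simp [hfi, hij])]

theorem pvB_eq (logs patterns : List String) :
    find_hits_alt logs patterns =
    (List.range (patterns.map (fun p => PySem.Str.lower p)).length).flatMap (fun j =>
      (pvDedup (fun _ => false) logs).filter
        (fun v => (patterns.map (fun p => PySem.Str.lower p)).findIdx? (fun p => pvM p v) = some j)) := by
  unfold find_hits_alt
  show (List.flatMap (fun bucket => bucket)
      (List.foldl (fun (sb : PySem.Set String × List (List String)) line =>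
        if PySem.Set.contains sb.1 line then sb
        else (PySem.Set.add sb.1 line,
              pvPlaceLine (patterns.map (fun p => PySem.Str.lower p)) 0 (PySem.Str.lower line) line sb.2))
        (PySem.Set.empty, (patterns.map (fun p => PySem.Str.lower p)).map (fun _ => [])) logs).2) = _
  rw [pvB_fold _ _ _ _ (by simp)]
  have hempty : (fun v => PySem.Set.contains (PySem.Set.empty (α := String)) v)
      = (fun _ : String => false) := by
    funext v; simp [PySem.Set.empty]
  rw [hempty]
  have hbs : ((patterns.map (fun p => PySem.Str.lower p)).map (fun _ => ([] : List String))).mapIdx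
        (fun j b => b ++ (pvDedup (fun _ => false) logs).filter
          (fun v => (patterns.map (fun p => PySem.Str.lower p)).findIdx? (fun p => pvM p v) = some j))
      = (List.range (patterns.map (fun p => PySem.Str.lower p)).length).map
          (fun j => (pvDedup (fun _ => false) logs).filter
            (fun v => (patterns.map (fun p => PySem.Str.lower p)).findIdx? (fun p => pvM p v) = some j)) := by
    apply List.ext_getElem (by simp)
    intro j h1 h2
    simp [List.getElem_mapIdx]
  rw [hbs, List.flatMap_map]

-- ===== VERDICT (by name: the statement is the Claim_ definition above) =====
theorem find_hits_spec : Claim_equal_find_hits := by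
  intro logs patterns _
  unfold Spec_find_hits
  rw [pvA_eq, pvB_eq, pvMain]
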